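-- pv_equiv track=rewrite | github.com/hawshemi/Coursera-Introduction-to-Discrete-Mathematics-for-Computer-Science-Specialization | 2. Combinatorics and Probability/Week 6/Final Project - Dice Game.py | count_wins
-- ===== SOURCE A (Python) =====
-- def count_wins(dice1, dice2):
--     # This function takes two dice (represented as lists of integers)
--     # and returns a tuple (count_dice1_wins, count_dice2_wins), where
--     # count_dice1_wins is the number of times the first die wins
--     # in a face-to-face comparison with the second die, and
--     # count_dice2_wins is the number of times the second die wins.
--     count_dice1_wins = 0
--     count_dice2_wins = 0
--     for i in dice1:
--         for j in dice2:
--             if i > j: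
--                 count_dice1_wins += 1
--             elif j > i:
--                 count_dice2_wins += 1
--     return (count_dice1_wins, count_dice2_wins)
-- ===== SOURCE B (Python) =====
-- def _bisect_left(a, x):
--     # CPython's bisect.bisect_left loop, written out (A imports nothing, so no bisect import)
--     lo, hi = 0, len(a)
--     while lo < hi:
--         mid = (lo + hi) // 2
--         if a[mid] < x:
--             lo = mid + 1
--         else:
--             hi = mid
--     return lo
--
--
-- def _bisect_right(a, x):
--     # CPython's bisect.bisect_right loop, written out
--     lo, hi = 0, len(a)
--     while lo < hi:
--         mid = (lo + hi) // 2
--         if x < a[mid]: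
--             hi = mid
--         else:
--             lo = mid + 1
--     return lo
--
--
-- def count_wins(dice1, dice2):
--     s = sorted(dice2)
--     m = len(s)
--     wins1 = 0
--     wins2 = 0
--     for i in dice1:
--         wins1 += _bisect_left(s, i)       # faces of dice2 strictly below i
--         wins2 += m - _bisect_right(s, i)  # faces of dice2 strictly above i
--     return (wins1, wins2)
-- ===== Notes on version B (the rewrite author's own statement) =====
-- stated objective: faster
-- what changed: Replaces the nested face-by-face comparison with sorting dice2 once and, for each face of dice1, two binary searches (bisect_left/bisect_right) that count smaller and larger faces directly.
import Mathlib
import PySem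

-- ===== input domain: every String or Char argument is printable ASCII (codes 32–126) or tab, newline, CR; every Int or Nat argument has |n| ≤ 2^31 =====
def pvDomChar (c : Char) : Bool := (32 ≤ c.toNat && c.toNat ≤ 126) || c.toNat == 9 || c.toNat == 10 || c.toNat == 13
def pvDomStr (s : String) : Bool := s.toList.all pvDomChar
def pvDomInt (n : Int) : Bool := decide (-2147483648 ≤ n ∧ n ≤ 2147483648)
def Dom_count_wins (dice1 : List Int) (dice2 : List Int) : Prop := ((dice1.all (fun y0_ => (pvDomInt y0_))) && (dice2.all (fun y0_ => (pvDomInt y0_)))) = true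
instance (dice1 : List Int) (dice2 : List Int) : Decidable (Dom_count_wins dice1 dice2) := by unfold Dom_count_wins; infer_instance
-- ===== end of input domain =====

-- B replaces A's nested O(n*m) comparison loops by sorting dice2 once and counting, per face of
-- dice1, the smaller/larger faces with two binary searches (asymptotically faster).

-- ===== PORT A =====
-- A: nested loops over dice1 × dice2 maintaining the two counters.
def count_wins (dice1 : List Int) (dice2 : List Int) : Int × Int :=
  dice1.foldl (fun acc i =>
    dice2.foldl (fun acc2 j =>
      if i > j then (acc2.1 + 1, acc2.2)
      else if j > i then (acc2.1, acc2.2 + 1)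
      else acc2) acc) (0, 0)

-- ===== PORT B =====
-- B: sort dice2 once; _bisect_left/_bisect_right in Source B are CPython's bisect loops verbatim,
-- ported as PySem.List.bisectLeft / bisectRight (the prelude's exact transcription of that loop).
def count_wins_alt (dice1 : List Int) (dice2 : List Int) : Int × Int :=
  let s := PySem.List.sorted dice2 (fun x => x) false
  let m := s.length
  dice1.foldl (fun (acc : Int × Int) i =>
    (acc.1 + (PySem.List.bisectLeft s i : Int),
     acc.2 + ((m : Int) - (PySem.List.bisectRight s i : Int)))) (0, 0)

-- ===== PRECONDITION & SPEC =====
def Spec_count_wins (dice1 : List Int) (dice2 : List Int) (out : Int × Int) : Prop := out = count_wins_alt dice1 dice2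
instance (dice1 : List Int) (dice2 : List Int) (out : Int × Int) : Decidable (Spec_count_wins dice1 dice2 out) := by unfold Spec_count_wins; infer_instance

-- ===== CLAIM (what is proved, stated in full; the proofs are below) =====
def Claim_equal_count_wins : Prop := ∀ (dice1 : List Int) (dice2 : List Int), Dom_count_wins dice1 dice2 → Spec_count_wins dice1 dice2 (count_wins dice1 dice2)

-- ===== LEMMAS AND PROOFS =====

-- countP of a list whose first k positions satisfy p and the rest do not is k
theorem countP_eq_of_split (s : List Int) (p : Int → Bool) (k : Nat) (hk : k ≤ s.length)
    (h1 : ∀ (j : Nat) (hj : j < s.length), j < k → p s[j] = true)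
    (h2 : ∀ (j : Nat) (hj : j < s.length), k ≤ j → p s[j] = false) :
    s.countP p = k := by
  have hsplit : s = s.take k ++ s.drop k := (List.take_append_drop k s).symm
  rw [hsplit, List.countP_append]
  have htake : (s.take k).countP p = (s.take k).length := by
    apply List.countP_eq_length.mpr
    intro a ha
    obtain ⟨j, hj, rfl⟩ := List.mem_iff_getElem.mp ha
    have hjk : j < k := lt_of_lt_of_le hj (by simp)
    have hjs : j < s.length := lt_of_lt_of_le hjk hk
    have : (s.take k)[j] = s[j] := List.getElem_take
    rw [this]; exact h1 j hjs hjk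
  have hdrop : (s.drop k).countP p = 0 := by
    apply List.countP_eq_zero.mpr
    intro a ha
    obtain ⟨j, hj, rfl⟩ := List.mem_iff_getElem.mp ha
    have hj' : j < s.length - k := by simpa using hj
    have hjs : k + j < s.length := by omega
    have : (s.drop k)[j] = s[k + j] := List.getElem_drop
    rw [this]; simp [h2 (k + j) hjs (Nat.le_add_right k j)]
  rw [htake, hdrop, List.length_take]
  omega

theorem bisectLeft_eq_countP (s : List Int) (hs : s.Pairwise (· ≤ ·)) (x : Int) :
    PySem.List.bisectLeft s x = s.countP (fun j => decide (x > j)) := by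
  obtain ⟨hle, hlt, hge⟩ := PySem.List.bisectLeft_spec s x hs
  refine (countP_eq_of_split s _ _ hle ?_ ?_).symm
  · intro j hj hjk; simpa using hlt j hj hjk
  · intro j hj hjk; simpa using hge j hj hjk

theorem bisectRight_eq_countP (s : List Int) (hs : s.Pairwise (· ≤ ·)) (x : Int) :
    PySem.List.bisectRight s x = s.countP (fun j => decide (j ≤ x)) := by
  obtain ⟨hle, hlt, hge⟩ := PySem.List.bisectRight_spec s x hs
  refine (countP_eq_of_split s _ _ hle ?_ ?_).symm
  · intro j hj hjk; simpa using hlt j hj hjk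
  · intro j hj hjk; simpa using hge j hj hjk

-- A's inner loop over dice2 adds (#{j < i}, #{j > i}) to the accumulator
theorem innerA_eq (dice2 : List Int) (i : Int) (c : Int × Int) :
    dice2.foldl (fun acc2 j =>
      if i > j then (acc2.1 + 1, acc2.2)
      else if j > i then (acc2.1, acc2.2 + 1)
      else acc2) c
    = (c.1 + (dice2.countP (fun j => decide (i > j)) : Int),
       c.2 + (dice2.countP (fun j => decide (j > i)) : Int)) := by
  induction dice2 generalizing c with
  | nil => simp
  | cons h t ih =>
    by_cases h1 : i > h
    · simp [List.foldl_cons, h1, ih, not_lt.mpr (le_of_lt h1)]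
      ring
    · by_cases h2 : h > i
      · simp [List.foldl_cons, h1, h2, ih]
        ring
      · simp [List.foldl_cons, h1, h2, ih]

-- per-face increments of A and B agree, so the folds over dice1 agree
theorem count_wins_eq_alt (dice1 dice2 : List Int) :
    count_wins dice1 dice2 = count_wins_alt dice1 dice2 := by
  unfold count_wins count_wins_alt
  set s := PySem.List.sorted dice2 (fun x => x) false with hs_def
  have hperm : s.Perm dice2 := PySem.List.sorted_perm dice2 (fun x => x) false
  have hpw : s.Pairwise (· ≤ ·) := PySem.List.sorted_pairwise dice2 (fun x => x)
  have hstep : ∀ (c : Int × Int) (i : Int),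
      dice2.foldl (fun acc2 j =>
        if i > j then (acc2.1 + 1, acc2.2)
        else if j > i then (acc2.1, acc2.2 + 1)
        else acc2) c
      = (c.1 + (PySem.List.bisectLeft s i : Int),
         c.2 + ((s.length : Int) - (PySem.List.bisectRight s i : Int))) := by
    intro c i
    rw [innerA_eq]
    have hbl : PySem.List.bisectLeft s i = dice2.countP (fun j => decide (i > j)) := by
      rw [bisectLeft_eq_countP s hpw i, hperm.countP_eq]
    have hbr : PySem.List.bisectRight s i = dice2.countP (fun j => decide (j ≤ i)) := by
      rw [bisectRight_eq_countP s hpw i, hperm.countP_eq]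
    have hlen : s.length = dice2.length := hperm.length_eq
    have hsum : dice2.countP (fun j => decide (j ≤ i)) + dice2.countP (fun j => decide (j > i)) = dice2.length := by
      have h := List.length_eq_countP_add_countP (p := fun j => decide (j ≤ i)) (l := dice2)
      have he : (dice2.countP fun a => decide ¬(decide (a ≤ i)) = true) = dice2.countP (fun j => decide (j > i)) := by
        congr 1
        funext j
        simp [not_le]
      omega
    rw [hbl, hbr, hlen]
    congr 1
    omega
  have main : ∀ (l : List Int) (c : Int × Int),
      l.foldl (fun acc i => dice2.foldl (fun acc2 j =>
        if i > j then (acc2.1 + 1, acc2.2)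
        else if j > i then (acc2.1, acc2.2 + 1)
        else acc2) acc) c
    = l.foldl (fun (acc : Int × Int) i =>
        (acc.1 + (PySem.List.bisectLeft s i : Int),
         acc.2 + ((s.length : Int) - (PySem.List.bisectRight s i : Int)))) c := by
    intro l
    induction l with
    | nil => intro c; rfl
    | cons hd tl ih => intro c; rw [List.foldl_cons, List.foldl_cons, hstep]; exact ih _
  exact main dice1 (0, 0)

-- ===== VERDICT (by name: the statement is the Claim_ definition above) =====
theorem count_wins_spec : Claim_equal_count_wins := by
  intro dice1 dice2 _
  unfold Spec_count_wins
  exact count_wins_eq_alt dice1 dice2
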